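-- pv_equiv track=rewrite | github.com/tsmp-falcon-platform/ci-bundle-utils | bundleutilspkg/src/bundleutilspkg/bundleutils.py | plugins_with_plugin_in_tree
-- ===== SOURCE A (Python) =====
-- def plugins_with_plugin_in_tree(graphs, graph_type, target_plugin):
--     reverse_dependency_graph = graphs[graph_type]["reverse_dependencies"]
--     result = set()
--     to_visit = {target_plugin}
--
--     # Traverse the reverse dependency graph
--     while to_visit:
--         current = to_visit.pop()
--         if current in result:
--             continue
--         result.add(current)
--         to_visit.update(
--             reverse_dependency_graph[current]
--         )  # Add plugins that depend on `current`
--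
--     result.discard(target_plugin)  # Exclude the target plugin itself from the result
--     return result
-- ===== SOURCE B (Python) =====
-- def plugins_with_plugin_in_tree(graphs, graph_type, target_plugin):
--     # Recursive depth-first search over the reverse dependency graph: the
--     # implicit call stack replaces A's explicit worklist set + pop loop.
--     graph = graphs[graph_type]["reverse_dependencies"]
--     result = set()
--
--     def dfs(node):
--         if node in result:
--             return
--         result.add(node)
--         for dep in graph[node]:
--             dfs(dep)
--
--     dfs(target_plugin)
--     result.discard(target_plugin)
--     return result
-- ===== Notes on version B (the rewrite author's own statement) =====
-- stated objective: alternative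
-- what changed: Replaces A's iterative worklist (a to_visit set popped in a loop, with a post-pop visited re-check and bulk set.update of neighbours) by a recursive depth-first search: an inner dfs(node) helper that returns on an already-visited node and otherwise recurses over each neighbour, using the call stack instead of the explicit frontier set.
import Mathlib
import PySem

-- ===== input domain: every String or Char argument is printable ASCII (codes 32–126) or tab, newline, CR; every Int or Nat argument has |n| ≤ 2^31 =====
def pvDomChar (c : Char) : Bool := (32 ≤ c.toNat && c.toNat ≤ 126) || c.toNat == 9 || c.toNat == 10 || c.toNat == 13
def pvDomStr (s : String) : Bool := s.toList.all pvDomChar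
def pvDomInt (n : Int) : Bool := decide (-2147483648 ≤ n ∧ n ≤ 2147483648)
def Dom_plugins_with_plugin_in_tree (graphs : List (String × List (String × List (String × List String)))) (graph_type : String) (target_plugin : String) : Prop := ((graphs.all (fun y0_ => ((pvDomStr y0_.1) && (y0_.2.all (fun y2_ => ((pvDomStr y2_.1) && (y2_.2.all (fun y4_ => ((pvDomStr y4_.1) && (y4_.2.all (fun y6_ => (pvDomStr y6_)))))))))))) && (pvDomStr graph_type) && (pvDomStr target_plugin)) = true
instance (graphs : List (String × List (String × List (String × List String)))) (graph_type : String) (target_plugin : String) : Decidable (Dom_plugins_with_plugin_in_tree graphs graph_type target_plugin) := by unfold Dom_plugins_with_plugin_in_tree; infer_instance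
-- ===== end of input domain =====

-- B replaces A's iterative worklist-set + pop loop by a recursive depth-first search
-- (alternative decomposition; the RETURN value — a set — is proved identical).

-- the reverse-dependency graph: graphs[graph_type]["reverse_dependencies"] (missing keys → [], excluded by Pre_)
def pvRdg (graphs : List (String × List (String × List (String × List String)))) (graph_type : String) : List (String × List String) :=
  (PySem.Dict.mk ((PySem.Dict.mk graphs).getD graph_type [])).getD "reverse_dependencies" []

-- reverse_dependency_graph[current] (KeyError → [], excluded by Pre_)
def pvNbrs (rdg : List (String × List String)) (k : String) : List String :=
  (PySem.Dict.mk rdg).getD k []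

-- ===== PORT A =====
-- Python's to_visit is an unordered set: set.pop takes an ARBITRARY element and set iteration
-- order is not modelled (the returned value is a set, so no observable output depends on the
-- traversal order).  The port represents to_visit as a duplicate-free list in most-recently-
-- updated-first order: 'to_visit.update(nbrs)' puts the (deduplicated) nbrs first, followed by
-- the old elements not among them, and 'to_visit.pop()' takes the head.
def pvMtf (tv : List String) (nbrs : List String) : List String :=
  let np := PySem.Set.ofList nbrs
  np ++ tv.filter (fun x => decide (x ∉ np))

-- A's 'while to_visit' loop; fuel (1 + total length of all dependency lists) bounds the number of
-- iterations — purely a totality guard.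
def pvLoopA (rdg : List (String × List String)) : Nat → List String → List String → List String
  | 0, result, _ => result
  | _ + 1, result, [] => result
  | f + 1, result, current :: rest =>
      if current ∈ result then pvLoopA rdg f result rest
      else pvLoopA rdg f (PySem.Set.add result current) (pvMtf rest (pvNbrs rdg current))

def plugins_with_plugin_in_tree (graphs : List (String × List (String × List (String × List String)))) (graph_type : String) (target_plugin : String) : List String :=
  let rdg := pvRdg graphs graph_type
  let result := pvLoopA rdg (1 + (rdg.map (fun p => p.2.length)).sum) [] (PySem.Set.ofList [target_plugin])
  PySem.Set.discard result target_plugin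

-- ===== PORT B =====
-- B's recursive dfs(node): return if visited, else add node and recurse on each neighbour
-- (the for-loop is the foldl).  fuel (> number of distinct nodes) only guards totality: the
-- recursion depth is bounded because every non-returning call adds a fresh node to result.
def pvDfs (rdg : List (String × List String)) : Nat → List String → String → List String
  | 0, result, _ => result
  | f + 1, result, node =>
      if node ∈ result then result
      else (pvNbrs rdg node).foldl (pvDfs rdg f) (PySem.Set.add result node)

def plugins_with_plugin_in_tree_alt (graphs : List (String × List (String × List (String × List String)))) (graph_type : String) (target_plugin : String) : List String :=
  let rdg := pvRdg graphs graph_type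
  let result := pvDfs rdg (2 + rdg.length + (rdg.map (fun p => p.2.length)).sum) [] target_plugin
  PySem.Set.discard result target_plugin

-- ===== PRECONDITION & SPEC =====
-- Pre_ excludes the inputs on which A raises KeyError (graph_type or "reverse_dependencies" missing,
-- or a visited plugin absent from the reverse-dependency graph); the exact raising condition is
-- reachability, which is not closed-form, so it is over-approximated syntactically: every listed
-- dependent and the target must be keys, which also excludes some inputs whose missing keys are
-- unreachable (A returns normally there).
def Pre_plugins_with_plugin_in_tree (graphs : List (String × List (String × List (String × List String)))) (graph_type : String) (target_plugin : String) : Prop :=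
  graph_type ∈ graphs.map Prod.fst ∧
  "reverse_dependencies" ∈ ((PySem.Dict.mk graphs).getD graph_type []).map Prod.fst ∧
  target_plugin ∈ (pvRdg graphs graph_type).map Prod.fst ∧
  ∀ p ∈ pvRdg graphs graph_type, ∀ n ∈ p.2, n ∈ (pvRdg graphs graph_type).map Prod.fst
instance (graphs : List (String × List (String × List (String × List String)))) (graph_type : String) (target_plugin : String) : Decidable (Pre_plugins_with_plugin_in_tree graphs graph_type target_plugin) := by unfold Pre_plugins_with_plugin_in_tree; infer_instance

def pvWitness_plugins_with_plugin_in_tree : (List (String × List (String × List (String × List String)))) × String × String :=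
  ([("bundle", [("reverse_dependencies", [("t", ["a"]), ("a", [])])])], "bundle", "t")

def Spec_plugins_with_plugin_in_tree (graphs : List (String × List (String × List (String × List String)))) (graph_type : String) (target_plugin : String) (out : List String) : Prop := out = plugins_with_plugin_in_tree_alt graphs graph_type target_plugin
instance (graphs : List (String × List (String × List (String × List String)))) (graph_type : String) (target_plugin : String) (out : List String) : Decidable (Spec_plugins_with_plugin_in_tree graphs graph_type target_plugin out) := by unfold Spec_plugins_with_plugin_in_tree; infer_instance

-- ===== CLAIM (what is proved, stated in full; the proofs are below) =====
def Claim_equal_plugins_with_plugin_in_tree : Prop := ∀ (graphs : List (String × List (String × List (String × List String)))) (graph_type : String) (target_plugin : String), Dom_plugins_with_plugin_in_tree graphs graph_type target_plugin → Pre_plugins_with_plugin_in_tree graphs graph_type target_plugin → Spec_plugins_with_plugin_in_tree graphs graph_type target_plugin (plugins_with_plugin_in_tree graphs graph_type target_plugin)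

-- ===== LEMMAS AND PROOFS =====

-- all node names that can ever enter result or to_visit: the target plus every key and every listed dependent
def pvAll (rdg : List (String × List String)) (t : String) : List String :=
  PySem.Set.ofList (t :: (rdg.map Prod.fst ++ (rdg.map Prod.snd).flatten))

-- weight of the not-yet-visited part of the graph: total length of the dependency lists of keys outside r
def pvS (rdg : List (String × List String)) (r : List String) : Nat :=
  ((rdg.filter (fun p => p.1 ∉ r)).map (fun p => p.2.length)).sum

lemma pvS_cons (p : String × List String) (rest : List (String × List String)) (r : List String) :
    pvS (p :: rest) r = (if p.1 ∈ r then 0 else p.2.length) + pvS rest r := by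
  by_cases h : p.1 ∈ r <;> simp [pvS, h]

lemma pvS_mono (rdg : List (String × List String)) (r r' : List String)
    (h : ∀ x ∈ r, x ∈ r') : pvS rdg r' ≤ pvS rdg r := by
  induction rdg with
  | nil => simp [pvS]
  | cons p rest ih =>
    rw [pvS_cons, pvS_cons]
    by_cases hr : p.1 ∈ r
    · simp [hr, h _ hr]; omega
    · by_cases hr' : p.1 ∈ r' <;> simp [hr, hr'] <;> omega

lemma pvNbrs_cons (k : String) (vs : List String) (rest : List (String × List String)) (c : String) :
    pvNbrs ((k, vs) :: rest) c = if k = c then vs else pvNbrs rest c := by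
  by_cases h : k = c <;>
    simp [pvNbrs, PySem.Dict.getD_eq_get?_getD, PySem.Dict.get?_mk_cons, h]

lemma pvS_drop (rdg : List (String × List String)) (r : List String) (c : String)
    (hc : c ∉ r) : pvS rdg (r ++ [c]) + (pvNbrs rdg c).length ≤ pvS rdg r := by
  induction rdg with
  | nil => simp [pvS, pvNbrs, PySem.Dict.getD_eq_get?_getD]; rfl
  | cons p rest ih =>
    obtain ⟨k, vs⟩ := p
    rw [pvS_cons, pvS_cons, pvNbrs_cons]
    by_cases hk : k = c
    · subst hk
      simp only [List.mem_append, List.mem_singleton, hc]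
      have h2 := pvS_mono rest r (r ++ [k]) ?_
      · simp at h2 ⊢; omega
      · intro x hx; exact List.mem_append.mpr (Or.inl hx)
    · have hmem : (k ∈ r ++ [c]) ↔ (k ∈ r) := by simp [hk]
      by_cases hkr : k ∈ r
      · simp [hmem.mpr hkr, hkr, hk]; omega
      · simp [hk, hkr, (by simp [hk, hkr] : ¬ k ∈ r ++ [c])]; omega

lemma pvS_nil_r (rdg : List (String × List String)) :
    pvS rdg [] = (rdg.map (fun p => p.2.length)).sum := by
  simp [pvS]


-- every neighbour list lives inside pvAll
lemma pvNbrs_flatten (rdg : List (String × List String)) (n x : String)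
    (hx : x ∈ pvNbrs rdg n) : x ∈ (rdg.map Prod.snd).flatten := by
  induction rdg with
  | nil => simp [pvNbrs, PySem.Dict.getD_eq_get?_getD] at hx; simp [PySem.Dict.get?] at hx
  | cons p rest ih =>
    obtain ⟨k, vs⟩ := p
    rw [pvNbrs_cons] at hx
    by_cases h : k = n
    · simp [h] at hx
      simp [List.mem_flatten]
      exact Or.inl hx
    · simp [h] at hx
      simp [List.mem_flatten] at ih ⊢
      rcases ih hx with ⟨l, hl, hxl⟩
      exact Or.inr ⟨l, hl, hxl⟩

lemma pvNbrs_sub (rdg : List (String × List String)) (t n x : String)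
    (hx : x ∈ pvNbrs rdg n) : x ∈ pvAll rdg t := by
  have h := pvNbrs_flatten rdg n x hx
  simp only [List.mem_flatten, List.mem_map] at h
  simp [pvAll, PySem.Set.mem_ofList, List.mem_flatten]
  rcases h with ⟨l, ⟨p, hp, rfl⟩, hxl⟩
  exact Or.inr (Or.inr ⟨p.2, ⟨p.1, by simpa using hp⟩, hxl⟩)

-- dfs on an already-visited node is the identity (any fuel)
lemma pvDfs_of_mem (rdg : List (String × List String)) (f : Nat) (res : List String) (n : String)
    (h : n ∈ res) : pvDfs rdg f res n = res := by
  cases f <;> simp [pvDfs, h]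

-- result only grows (as a prefix) through dfs and through folding dfs
lemma pvFold_prefix_of (rdg : List (String × List String)) (f : Nat)
    (hd : ∀ res n, res <+: pvDfs rdg f res n) :
    ∀ (l acc : List String), acc <+: l.foldl (pvDfs rdg f) acc := by
  intro l
  induction l with
  | nil => intro acc; exact List.prefix_refl acc
  | cons x l ih =>
    intro acc
    exact (hd acc x).trans (ih (pvDfs rdg f acc x))

lemma pvDfs_prefix (rdg : List (String × List String)) :
    ∀ f res n, res <+: pvDfs rdg f res n := by
  intro f
  induction f with
  | zero => intro res n; exact List.prefix_refl res
  | succ f ih =>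
    intro res n
    by_cases h : n ∈ res
    · simp [pvDfs, h]
    · simp only [pvDfs, h, if_false]
      refine List.IsPrefix.trans ?_ (pvFold_prefix_of rdg f ih _ _)
      rw [PySem.Set.add_of_not_mem h]
      exact List.prefix_append res [n]

lemma pvFold_prefix (rdg : List (String × List String)) (f : Nat) :
    ∀ (l acc : List String), acc <+: l.foldl (pvDfs rdg f) acc :=
  pvFold_prefix_of rdg f (pvDfs_prefix rdg f)

lemma pvDfs_mem_self (rdg : List (String × List String)) (f : Nat) (res : List String) (n : String)
    (hf : 0 < f) : n ∈ pvDfs rdg f res n := by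
  obtain ⟨f, rfl⟩ : ∃ f', f = f' + 1 := ⟨f - 1, by omega⟩
  by_cases h : n ∈ res
  · simp [pvDfs, h]
  · simp only [pvDfs, h, if_false]
    apply (pvFold_prefix rdg f _ _).subset
    rw [PySem.Set.add_of_not_mem h]
    simp

lemma pvFold_mem (rdg : List (String × List String)) (f : Nat) (hf : 0 < f) :
    ∀ (l acc : List String) (x : String), x ∈ l → x ∈ l.foldl (pvDfs rdg f) acc := by
  intro l
  induction l with
  | nil => intro acc x hx; simp at hx
  | cons y l ih =>
    intro acc x hx
    rcases List.mem_cons.mp hx with rfl | hx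
    · exact (pvFold_prefix rdg f l _).subset (pvDfs_mem_self rdg f acc x hf)
    · exact ih _ x hx

-- the count of pvAll-nodes outside res is antitone in res
lemma pvFilt_anti (A : List String) (res res' : List String) (h : ∀ x ∈ res, x ∈ res') :
    (A.filter (fun x => decide (x ∉ res'))).length ≤ (A.filter (fun x => decide (x ∉ res))).length := by
  induction A with
  | nil => simp
  | cons a rest ih =>
    simp only [List.filter_cons]
    by_cases h1 : a ∈ res'
    · by_cases h2 : a ∈ res
      · simpa [h1, h2] using ih
      · simp only [h1, h2]
        simp only [decide_not, not_true_eq_false] at *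
        simp
        omega
    · have h2 : a ∉ res := fun hx => h1 (h a hx)
      simpa [h1, h2] using ih

lemma pvFilt_drop (A : List String) (res : List String) (n : String) (hA : n ∈ A) (hn : n ∉ res) :
    (A.filter (fun x => decide (x ∉ res ++ [n]))).length < (A.filter (fun x => decide (x ∉ res))).length := by
  have heq : A.filter (fun x => decide (x ∉ res ++ [n]))
      = (A.filter (fun x => decide (x ∉ res))).filter (fun x => decide (x ≠ n)) := by
    rw [List.filter_filter]
    apply List.filter_congr
    intro x _
    by_cases h1 : x ∈ res <;> by_cases h2 : x = n <;> simp [h1, h2]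
  rw [heq]
  apply List.length_filter_lt_length_iff_exists.mpr
  exact ⟨n, by simp [List.mem_filter, hA, hn], by simp⟩

lemma pvDfs_fuel (rdg : List (String × List String)) (t : String) :
    ∀ (k f g : Nat) (res : List String) (n : String), n ∈ pvAll rdg t →
      ((pvAll rdg t).filter (fun x => decide (x ∉ res))).length ≤ k → k < f → k < g →
      pvDfs rdg f res n = pvDfs rdg g res n := by
  intro k
  induction k with
  | zero =>
    intro f g res n hn hlen _ _
    have hres : n ∈ res := by
      by_contra hmem
      have : n ∈ (pvAll rdg t).filter (fun x => decide (x ∉ res)) := by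
        simp [List.mem_filter, hn, hmem]
      have := List.length_pos_of_mem this
      omega
    rw [pvDfs_of_mem rdg f res n hres, pvDfs_of_mem rdg g res n hres]
  | succ k ih =>
    intro f g res n hn hlen hf hg
    by_cases hres : n ∈ res
    · rw [pvDfs_of_mem rdg f res n hres, pvDfs_of_mem rdg g res n hres]
    · obtain ⟨f', rfl⟩ : ∃ f', f = f' + 1 := ⟨f - 1, by omega⟩
      obtain ⟨g', rfl⟩ : ∃ g', g = g' + 1 := ⟨g - 1, by omega⟩
      simp only [pvDfs, hres, if_false]
      rw [PySem.Set.add_of_not_mem hres]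
      have hstart : ((pvAll rdg t).filter (fun x => decide (x ∉ res ++ [n]))).length ≤ k := by
        have := pvFilt_drop (pvAll rdg t) res n hn hres
        omega
      have hsubl : ∀ x ∈ pvNbrs rdg n, x ∈ pvAll rdg t := fun x hx => pvNbrs_sub rdg t n x hx
      -- inner fold
      have : ∀ (l acc : List String), (∀ x ∈ l, x ∈ pvAll rdg t) →
          ((pvAll rdg t).filter (fun x => decide (x ∉ acc))).length ≤ k →
          l.foldl (pvDfs rdg f') acc = l.foldl (pvDfs rdg g') acc := by
        intro l
        induction l with
        | nil => intro acc _ _; rfl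
        | cons x l ihl =>
          intro acc hl hacc
          have hx := ih f' g' acc x (hl x (by simp)) hacc (by omega) (by omega)
          simp only [List.foldl_cons, hx]
          apply ihl _ (fun y hy => hl y (by simp [hy]))
          calc ((pvAll rdg t).filter (fun z => decide (z ∉ pvDfs rdg g' acc x))).length
              ≤ ((pvAll rdg t).filter (fun z => decide (z ∉ acc))).length :=
                pvFilt_anti _ _ _ (pvDfs_prefix rdg g' acc x).subset
            _ ≤ k := hacc
      exact this _ _ hsubl hstart

lemma pvFold_fuel (rdg : List (String × List String)) (t : String) (k f g : Nat)
    (hf : k < f) (hg : k < g) :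
    ∀ (l acc : List String), (∀ x ∈ l, x ∈ pvAll rdg t) →
      ((pvAll rdg t).filter (fun x => decide (x ∉ acc))).length ≤ k →
      l.foldl (pvDfs rdg f) acc = l.foldl (pvDfs rdg g) acc := by
  intro l
  induction l with
  | nil => intro acc _ _; rfl
  | cons x l ihl =>
    intro acc hl hacc
    have hx := pvDfs_fuel rdg t k f g acc x (hl x (by simp)) hacc hf hg
    simp only [List.foldl_cons, hx]
    apply ihl _ (fun y hy => hl y (by simp [hy]))
    calc ((pvAll rdg t).filter (fun z => decide (z ∉ pvDfs rdg g acc x))).length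
        ≤ ((pvAll rdg t).filter (fun z => decide (z ∉ acc))).length :=
          pvFilt_anti _ _ _ (pvDfs_prefix rdg g acc x).subset
      _ ≤ k := hacc

lemma pvFold_ofList (rdg : List (String × List String)) (f : Nat) (hf : 0 < f) :
    ∀ (l acc : List String), l.foldl (pvDfs rdg f) acc = (PySem.Set.ofList l).foldl (pvDfs rdg f) acc := by
  intro l
  induction l using List.reverseRecOn with
  | nil => intro acc; rfl
  | append_singleton l x ih =>
    intro acc
    rw [List.foldl_append, PySem.Set.ofList_append_singleton]
    by_cases hx : x ∈ PySem.Set.ofList l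
    · rw [PySem.Set.add_of_mem hx, ← ih]
      have hxl : x ∈ l := by simpa [PySem.Set.mem_ofList] using hx
      simp only [List.foldl_cons, List.foldl_nil]
      exact pvDfs_of_mem rdg f _ x (pvFold_mem rdg f hf l acc x hxl)
    · rw [PySem.Set.add_of_not_mem hx, List.foldl_append, ← ih]

lemma pvFold_filter (rdg : List (String × List String)) (f : Nat) (np : List String) :
    ∀ (rest acc : List String), (∀ x ∈ np, x ∈ acc) →
      rest.foldl (pvDfs rdg f) acc = (rest.filter (fun x => decide (x ∉ np))).foldl (pvDfs rdg f) acc := by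
  intro rest
  induction rest with
  | nil => intro acc _; rfl
  | cons r rest ih =>
    intro acc h
    by_cases hr : r ∈ np
    · have : pvDfs rdg f acc r = acc := pvDfs_of_mem rdg f acc r (h r hr)
      simp only [List.filter_cons, hr, List.foldl_cons, this]
      simpa [hr] using ih acc h
    · have hfc : (r :: rest).filter (fun x => decide (x ∉ np)) = r :: rest.filter (fun x => decide (x ∉ np)) := by
        simp [hr]
      rw [hfc, List.foldl_cons, List.foldl_cons]
      exact ih (pvDfs rdg f acc r) (fun x hx => (pvDfs_prefix rdg f acc r).subset (h x hx))

lemma pvLoop_eq_fold (rdg : List (String × List String)) (t : String) :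
    ∀ (fa : Nat) (res tv : List String), (∀ x ∈ tv, x ∈ pvAll rdg t) →
      tv.length + pvS rdg res ≤ fa →
      pvLoopA rdg fa res tv = tv.foldl (pvDfs rdg (1 + (pvAll rdg t).length)) res := by
  intro fa
  induction fa with
  | zero =>
    intro res tv _ hlen
    have : tv = [] := List.eq_nil_of_length_eq_zero (by omega)
    subst this
    rfl
  | succ fa ih =>
    intro res tv htv hlen
    cases tv with
    | nil => rfl
    | cons c rest =>
      set fb := 1 + (pvAll rdg t).length with hfb
      by_cases hc : c ∈ res
      · have : pvLoopA rdg (fa + 1) res (c :: rest) = pvLoopA rdg fa res rest := by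
          simp [pvLoopA, hc]
        rw [this, List.foldl_cons, pvDfs_of_mem rdg fb res c hc]
        exact ih res rest (fun x hx => htv x (by simp [hx])) (by simp at hlen; omega)
      · have hcA : c ∈ pvAll rdg t := htv c (by simp)
        set nbrs := pvNbrs rdg c with hnbrs
        set np := PySem.Set.ofList nbrs with hnp
        have hmtf : pvMtf rest nbrs = np ++ rest.filter (fun x => decide (x ∉ np)) := rfl
        have hstep : pvLoopA rdg (fa + 1) res (c :: rest)
            = pvLoopA rdg fa (res ++ [c]) (np ++ rest.filter (fun x => decide (x ∉ np))) := by
          simp only [pvLoopA]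
          rw [if_neg hc, PySem.Set.add_of_not_mem hc, ← hnbrs, hmtf]
        -- measure for IH
        have hlen' : (np ++ rest.filter (fun x => decide (x ∉ np))).length + pvS rdg (res ++ [c]) ≤ fa := by
          have h1 : np.length ≤ nbrs.length := PySem.Set.length_ofList_le nbrs
          have h2 : (rest.filter (fun x => decide (x ∉ np))).length ≤ rest.length :=
            List.length_filter_le _ rest
          have h3 := pvS_drop rdg res c hc
          rw [← hnbrs] at h3
          simp only [List.length_append, List.length_cons] at hlen ⊢
          omega
        have hmem' : ∀ x ∈ np ++ rest.filter (fun x => decide (x ∉ np)), x ∈ pvAll rdg t := by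
          intro x hx
          rcases List.mem_append.mp hx with hx | hx
          · exact pvNbrs_sub rdg t c x (by simpa [hnp, PySem.Set.mem_ofList] using hx)
          · exact htv x (by simp [List.mem_filter.mp hx |>.1])
        rw [hstep, ih _ _ hmem' hlen']
        -- now massage the RHS
        have hfbpos : 0 < fb := by omega
        rw [List.foldl_append]
        rw [← pvFold_filter rdg fb np rest _ (fun x hx => pvFold_mem rdg fb hfbpos np (res ++ [c]) x hx)]
        rw [← pvFold_ofList rdg fb hfbpos nbrs (res ++ [c])]
        obtain ⟨fb', hfb'⟩ : ∃ fb', fb = fb' + 1 := ⟨fb - 1, by omega⟩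
        have hfb'A : fb' = (pvAll rdg t).length := by omega
        have hdfs : pvDfs rdg fb res c = nbrs.foldl (pvDfs rdg fb') (res ++ [c]) := by
          rw [hfb']
          show (if c ∈ res then res else (pvNbrs rdg c).foldl (pvDfs rdg fb') (PySem.Set.add res c)) = _
          rw [if_neg hc, PySem.Set.add_of_not_mem hc, ← hnbrs]
        rw [List.foldl_cons, hdfs]
        congr 1
        apply pvFold_fuel rdg t ((pvAll rdg t).filter (fun x => decide (x ∉ res ++ [c]))).length
        · have hd := pvFilt_drop (pvAll rdg t) res c hcA hc
          have hle : ((pvAll rdg t).filter (fun x => decide (x ∉ res))).length ≤ (pvAll rdg t).length :=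
            List.length_filter_le _ _
          omega
        · have hd := pvFilt_drop (pvAll rdg t) res c hcA hc
          have hle : ((pvAll rdg t).filter (fun x => decide (x ∉ res))).length ≤ (pvAll rdg t).length :=
            List.length_filter_le _ _
          omega
        · exact fun x hx => pvNbrs_sub rdg t c x (hnbrs ▸ hx)
        · exact le_refl _

-- ===== VERDICT (by name: the statement is the Claim_ definition above) =====
theorem plugins_with_plugin_in_tree_spec : Claim_equal_plugins_with_plugin_in_tree := by
  intro graphs graph_type target_plugin _ _
  dsimp only [Spec_plugins_with_plugin_in_tree, plugins_with_plugin_in_tree,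
    plugins_with_plugin_in_tree_alt]
  set rdg := pvRdg graphs graph_type with hrdg
  set t := target_plugin with ht
  congr 1
  have htA : t ∈ pvAll rdg t := by
    simp only [pvAll, PySem.Set.mem_ofList, List.mem_cons]
    tauto
  have hofList : PySem.Set.ofList [t] = [t] := rfl
  rw [hofList]
  have h1 := pvLoop_eq_fold rdg t (1 + (rdg.map (fun p => p.2.length)).sum) [] [t]
    (by intro x hx; simp at hx; subst hx; exact htA)
    (by rw [pvS_nil_r]; simp)
  rw [h1, List.foldl_cons, List.foldl_nil]
  -- the two dfs fuels agree
  have hAlen : (pvAll rdg t).length ≤ 1 + rdg.length + (rdg.map (fun p => p.2.length)).sum := by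
    have h2 : (pvAll rdg t).length ≤ (t :: (rdg.map Prod.fst ++ (rdg.map Prod.snd).flatten)).length :=
      PySem.Set.length_ofList_le _
    have h3 : ((rdg.map Prod.snd).flatten).length = (rdg.map (fun p => p.2.length)).sum := by
      rw [List.length_flatten, List.map_map]
      rfl
    simp only [List.length_cons, List.length_append, List.length_map] at h2
    omega
  have hk : ((pvAll rdg t).filter (fun x => decide (x ∉ ([] : List String)))).length
      = (pvAll rdg t).length := by
    simp
  apply pvDfs_fuel rdg t (pvAll rdg t).length
  · exact htA
  · rw [hk]
  · omega
  · omega
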